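-- pv_equiv track=rewrite | github.com/williamson1109/xai-adversarial-attacks | scripts/llm_attack.py | find_changed_tokens
-- ===== SOURCE A (Python) =====
-- def find_changed_tokens(original: str, modified: str) -> str:
--     """Identify which words changed between original and modified text."""
--     orig_words = original.lower().split()
--     mod_words  = modified.lower().split()
--     changed = []
--     for i, (o, m) in enumerate(zip(orig_words, mod_words)):
--         if o != m:
--             changed.append(f'"{o}"→"{m}"')
--     # handle length differences
--     if len(orig_words) > len(mod_words):
--         for w in orig_words[len(mod_words):]:
--             changed.append(f'"{w}"→[removed]')
--     elif len(mod_words) > len(orig_words):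
--         for w in mod_words[len(orig_words):]:
--             changed.append(f'[added]→"{w}"')
--     return ", ".join(changed) if changed else "no change detected"
-- ===== SOURCE B (Python) =====
-- def find_changed_tokens(original: str, modified: str) -> str:
--     """Identify which words changed between original and modified text."""
--     def walk(os, ms):
--         if not os and not ms:
--             return []
--         if not os:
--             return [f'[added]→"{ms[0]}"'] + walk(os, ms[1:])
--         if not ms:
--             return [f'"{os[0]}"→[removed]'] + walk(os[1:], ms)
--         head = [f'"{os[0]}"→"{ms[0]}"'] if os[0] != ms[0] else []
--         return head + walk(os[1:], ms[1:])
--     changed = walk(original.lower().split(), modified.lower().split())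
--     return ", ".join(changed) if changed else "no change detected"
-- ===== Notes on version B (the rewrite author's own statement) =====
-- stated objective: alternative
-- what changed: Replaces the zip pass plus two length-difference tail slice loops with a single recursive walk over both word lists that handles matched pairs, removals and additions in one pass.
import Mathlib
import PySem

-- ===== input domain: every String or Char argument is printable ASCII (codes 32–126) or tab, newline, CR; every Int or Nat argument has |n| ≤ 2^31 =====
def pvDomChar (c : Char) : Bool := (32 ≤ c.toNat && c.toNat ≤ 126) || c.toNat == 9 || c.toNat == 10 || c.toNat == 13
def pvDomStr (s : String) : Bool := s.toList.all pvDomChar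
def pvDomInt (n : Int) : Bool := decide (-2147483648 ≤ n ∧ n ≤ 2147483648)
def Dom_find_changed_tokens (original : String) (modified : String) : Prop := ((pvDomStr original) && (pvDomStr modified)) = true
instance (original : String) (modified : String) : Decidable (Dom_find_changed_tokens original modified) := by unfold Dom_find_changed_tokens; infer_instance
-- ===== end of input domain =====

-- B replaces A's zip pass plus two tail slice loops by one recursive walk over both
-- word lists (objective: alternative decomposition, same cost).

def pvFmtPair (o m : String) : String := "\"" ++ o ++ "\"→\"" ++ m ++ "\""
def pvFmtRem (w : String) : String := "\"" ++ w ++ "\"→[removed]"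
def pvFmtAdd (w : String) : String := "[added]→\"" ++ w ++ "\""

-- ===== PORT A =====
def find_changed_tokens (original : String) (modified : String) : String :=
  let orig_words := PySem.Str.split₀ (PySem.Str.lower original)
  let mod_words := PySem.Str.split₀ (PySem.Str.lower modified)
  let changed : List String :=
    (orig_words.zip mod_words).foldl
      (fun acc p => if p.1 ≠ p.2 then acc ++ [pvFmtPair p.1 p.2] else acc) []
  let changed :=
    if mod_words.length < orig_words.length then
      (PySem.List.slice orig_words (some (mod_words.length : Int)) none).foldl
        (fun acc w => acc ++ [pvFmtRem w]) changed
    else if orig_words.length < mod_words.length then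
      (PySem.List.slice mod_words (some (orig_words.length : Int)) none).foldl
        (fun acc w => acc ++ [pvFmtAdd w]) changed
    else changed
  if changed ≠ [] then PySem.Str.join ", " changed else "no change detected"

-- ===== PORT B =====
def pvWalk : List String → List String → List String
  | [], [] => []
  | [], m :: ms => pvFmtAdd m :: pvWalk [] ms
  | o :: os, [] => pvFmtRem o :: pvWalk os []
  | o :: os, m :: ms => (if o ≠ m then [pvFmtPair o m] else []) ++ pvWalk os ms

def find_changed_tokens_alt (original : String) (modified : String) : String :=
  let changed := pvWalk (PySem.Str.split₀ (PySem.Str.lower original))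
                        (PySem.Str.split₀ (PySem.Str.lower modified))
  if changed ≠ [] then PySem.Str.join ", " changed else "no change detected"

-- ===== PRECONDITION & SPEC =====
def Spec_find_changed_tokens (original : String) (modified : String) (out : String) : Prop := out = find_changed_tokens_alt original modified
instance (original : String) (modified : String) (out : String) : Decidable (Spec_find_changed_tokens original modified out) := by unfold Spec_find_changed_tokens; infer_instance

-- ===== CLAIM (what is proved, stated in full; the proofs are below) =====
def Claim_equal_find_changed_tokens : Prop := ∀ (original : String) (modified : String), Dom_find_changed_tokens original modified → Spec_find_changed_tokens original modified (find_changed_tokens original modified)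

-- ===== LEMMAS AND PROOFS =====

lemma pvWalk_nil_left (ms : List String) : pvWalk [] ms = ms.map pvFmtAdd := by
  induction ms with
  | nil => simp [pvWalk]
  | cons m ms ih => simp [pvWalk, ih]

lemma pvWalk_eq (os ms : List String) :
    pvWalk os ms =
      ((os.zip ms).flatMap (fun p => if p.1 ≠ p.2 then [pvFmtPair p.1 p.2] else []))
        ++ (os.drop ms.length).map pvFmtRem ++ (ms.drop os.length).map pvFmtAdd := by
  induction os generalizing ms with
  | nil => simp [pvWalk_nil_left]
  | cons o os ih =>
    cases ms with
    | nil =>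
      simp only [List.zip_nil_right, List.flatMap_nil, List.drop_zero, List.drop_nil,
        List.map_nil, List.nil_append, List.append_nil, List.map_cons]
      have := ih []
      simp only [List.zip_nil_right, List.flatMap_nil, List.drop_zero, List.drop_nil,
        List.map_nil, List.nil_append, List.append_nil] at this
      simp [pvWalk, this]
    | cons m ms => simp [pvWalk, ih ms, List.append_assoc]

lemma foldl_rem (l : List String) (acc : List String) :
    l.foldl (fun acc w => acc ++ [pvFmtRem w]) acc = acc ++ l.map pvFmtRem := by
  induction l generalizing acc with
  | nil => simp
  | cons x xs ih => simp [ih]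

lemma foldl_add (l : List String) (acc : List String) :
    l.foldl (fun acc w => acc ++ [pvFmtAdd w]) acc = acc ++ l.map pvFmtAdd := by
  induction l generalizing acc with
  | nil => simp
  | cons x xs ih => simp [ih]

lemma changed_eq (os ms : List String) :
    (if ms.length < os.length then
       (PySem.List.slice os (some (ms.length : Int)) none).foldl
         (fun acc w => acc ++ [pvFmtRem w])
         ((os.zip ms).foldl (fun acc p => if p.1 ≠ p.2 then acc ++ [pvFmtPair p.1 p.2] else acc) [])
     else if os.length < ms.length then
       (PySem.List.slice ms (some (os.length : Int)) none).foldl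
         (fun acc w => acc ++ [pvFmtAdd w])
         ((os.zip ms).foldl (fun acc p => if p.1 ≠ p.2 then acc ++ [pvFmtPair p.1 p.2] else acc) [])
     else (os.zip ms).foldl (fun acc p => if p.1 ≠ p.2 then acc ++ [pvFmtPair p.1 p.2] else acc) [])
    = pvWalk os ms := by
  rw [pvWalk_eq]
  simp only [PySem.List.slice_from_natCast, PySem.List.foldl_append_if, foldl_rem, foldl_add,
    List.nil_append]
  have hflat : ∀ (l : List (String × String)) (acc : List String),
      l.foldl (fun acc p => if p.1 = p.2 then acc else acc ++ [pvFmtPair p.1 p.2]) acc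
        = acc ++ l.flatMap (fun p => if p.1 = p.2 then [] else [pvFmtPair p.1 p.2]) := by
    intro l
    induction l with
    | nil => simp
    | cons x xs ih =>
      intro acc
      by_cases h : x.1 = x.2 <;> simp [List.flatMap_cons, h, ih]
  rcases lt_trichotomy ms.length os.length with h | h | h
  · rw [if_pos h]
    have h2 : ¬ os.length < ms.length := by omega
    have hms : ms.drop os.length = [] := List.drop_eq_nil_of_le (by omega)
    simp [hms, hflat]
  · have h1 : ¬ ms.length < os.length := by omega
    have hms : ms.drop os.length = [] := List.drop_eq_nil_of_le (by omega)
    have hos : os.drop ms.length = [] := List.drop_eq_nil_of_le (by omega)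
    simp [h1, hms, hos, hflat]
  · have h1 : ¬ ms.length < os.length := by omega
    have hos : os.drop ms.length = [] := List.drop_eq_nil_of_le (by omega)
    simp [h1, h, hos, hflat]

-- ===== VERDICT (by name: the statement is the Claim_ definition above) =====
theorem find_changed_tokens_spec : Claim_equal_find_changed_tokens := by
  intro original modified _
  unfold Spec_find_changed_tokens find_changed_tokens find_changed_tokens_alt
  dsimp only []
  rw [changed_eq]
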